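-- pv_equiv track=rewrite | github.com/thatrandomasiandev/USC-Racing-config | backend/internal/motec/recommendation_service.py | _identify_missing_channels
-- ===== SOURCE A (Python) =====
-- from typing import Dict, List, Optional, Tuple
--
-- def _identify_missing_channels(ldx_channels: Dict, ld_analysis: Dict) -> List[str]:
--     """Identify channels that should exist but don't"""
--     required_channels = [
--         "speed", "rpm", "throttle", "brake", "steering",
--         "g_force_lat", "oil_temp", "water_temp"
--     ]
--
--     missing = []
--     ldx_channel_names = {ch.lower() for ch in ldx_channels.keys()}
--
--     for req_ch in required_channels:
--         found = False
--         for ldx_ch in ldx_channel_names: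
--             if req_ch in ldx_ch or ldx_ch in req_ch:
--                 found = True
--                 break
--         if not found:
--             missing.append(req_ch)
--
--     return missing
-- ===== SOURCE B (Python) =====
-- def _identify_missing_channels(ldx_channels, ld_analysis):
--     """Identify channels that should exist but don't"""
--     required_channels = [
--         "speed", "rpm", "throttle", "brake", "steering",
--         "g_force_lat", "oil_temp", "water_temp"
--     ]
--
--     def substrings(s):
--         return {s[i:j] for i in range(len(s) + 1) for j in range(i, len(s) + 1)}
--
--     # Build a substring index of all lowercased channel names once; a required
--     # channel r is covered iff r is in the index ("r in name") or some name is
--     # itself a substring of r ("name in r", tested via substrings(r) & names).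
--     names = set()
--     index = set()
--     for ch in ldx_channels.keys():
--         name = ch.lower()
--         names.add(name)
--         index |= substrings(name)
--
--     return [req for req in required_channels
--             if req not in index and not (substrings(req) & names)]
-- ===== Notes on version B (the rewrite author's own statement) =====
-- stated objective: alternative
-- what changed: B replaces A's pairwise bidirectional substring scans by a substring index: it enumerates all substrings of the lowercased channel names into one hash set, so 'req in name' becomes a single set lookup and 'name in req' an intersection of substrings(req) with the name set.
import Mathlib
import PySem

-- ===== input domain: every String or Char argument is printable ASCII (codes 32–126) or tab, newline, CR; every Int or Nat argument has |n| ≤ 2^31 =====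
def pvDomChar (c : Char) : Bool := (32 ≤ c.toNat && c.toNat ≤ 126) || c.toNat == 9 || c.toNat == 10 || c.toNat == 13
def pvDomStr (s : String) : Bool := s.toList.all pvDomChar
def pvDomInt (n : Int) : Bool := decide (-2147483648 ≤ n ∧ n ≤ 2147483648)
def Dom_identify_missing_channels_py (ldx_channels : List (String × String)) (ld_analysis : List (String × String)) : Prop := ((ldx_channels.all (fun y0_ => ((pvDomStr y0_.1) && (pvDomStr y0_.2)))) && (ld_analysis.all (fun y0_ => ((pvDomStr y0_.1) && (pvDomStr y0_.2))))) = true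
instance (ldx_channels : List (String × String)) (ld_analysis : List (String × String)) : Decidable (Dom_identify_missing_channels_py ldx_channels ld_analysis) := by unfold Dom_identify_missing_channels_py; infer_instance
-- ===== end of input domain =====

-- B replaces A's pairwise substring scans by a substring index: one pass enumerates all
-- substrings of the lowercased names into a set, then each required channel is decided by
-- set lookups (alternative decomposition, same results).

def pvRequired : List String :=
  ["speed", "rpm", "throttle", "brake", "steering", "g_force_lat", "oil_temp", "water_temp"]

-- ===== PORT A =====
-- {ch.lower() for ch in ldx_channels.keys()}; the inner 'for … break' only produces the
-- boolean 'found', which is order-independent, so it is ported as .any over the Set's list.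
def identify_missing_channels_py (ldx_channels : List (String × String)) (ld_analysis : List (String × String)) : List String :=
  let ldx_channel_names : PySem.Set String :=
    PySem.Set.ofList ((ldx_channels.map Prod.fst).map PySem.Str.lower)
  pvRequired.foldl
    (fun missing req_ch =>
      let found := ldx_channel_names.any
        (fun ldx_ch => PySem.Str.isIn req_ch ldx_ch || PySem.Str.isIn ldx_ch req_ch)
      if found then missing else missing ++ [req_ch])
    []

-- ===== PORT B =====
-- {s[i:j] for i in range(len(s)+1) for j in range(i, len(s)+1)}
def pvSubstrings (s : String) : PySem.Set String :=
  PySem.Set.ofList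
    ((PySem.List.pyRange 0 ((PySem.Str.len s : Int) + 1) 1).flatMap (fun i =>
      (PySem.List.pyRange i ((PySem.Str.len s : Int) + 1) 1).map (fun j =>
        PySem.Str.slice s (some i) (some j))))

def identify_missing_channels_py_alt (ldx_channels : List (String × String)) (ld_analysis : List (String × String)) : List String :=
  let st :=
    ldx_channels.foldl
      (fun (p : PySem.Set String × PySem.Set String) kv =>
        let name := PySem.Str.lower kv.1
        (PySem.Set.add p.1 name, PySem.Set.union p.2 (pvSubstrings name)))
      (PySem.Set.empty, PySem.Set.empty)
  pvRequired.filter (fun req =>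
    !(PySem.Set.contains st.2 req) &&
      (PySem.Set.len (PySem.Set.inter (pvSubstrings req) st.1) == 0))

-- ===== PRECONDITION & SPEC =====
def Spec_identify_missing_channels_py (ldx_channels : List (String × String)) (ld_analysis : List (String × String)) (out : List String) : Prop := out = identify_missing_channels_py_alt ldx_channels ld_analysis
instance (ldx_channels : List (String × String)) (ld_analysis : List (String × String)) (out : List String) : Decidable (Spec_identify_missing_channels_py ldx_channels ld_analysis out) := by unfold Spec_identify_missing_channels_py; infer_instance

-- ===== CLAIM (what is proved, stated in full; the proofs are below) =====
def Claim_equal_identify_missing_channels_py : Prop := ∀ (ldx_channels : List (String × String)) (ld_analysis : List (String × String)), Dom_identify_missing_channels_py ldx_channels ld_analysis → Spec_identify_missing_channels_py ldx_channels ld_analysis (identify_missing_channels_py ldx_channels ld_analysis)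

-- ===== LEMMAS AND PROOFS =====

-- A's append loop is a filter
theorem foldl_if_append (c : String → Bool) (l acc : List String) :
    l.foldl (fun acc r => if c r then acc else acc ++ [r]) acc
      = acc ++ l.filter (fun r => !c r) := by
  induction l generalizing acc with
  | nil => simp
  | cons x xs ih =>
    by_cases h : c x = true <;> simp [List.foldl_cons, ih, h]

-- the substring set is exactly the set of infixes
theorem mem_pvSubstrings (s t : String) :
    t ∈ pvSubstrings s ↔ t.toList <:+: s.toList := by
  unfold pvSubstrings
  rw [PySem.Set.mem_ofList, List.mem_flatMap]
  have hlen : (PySem.Str.len s : Int) = (s.toList.length : Int) := by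
    simp [PySem.Str.len_eq]
  constructor
  · rintro ⟨i, hi, ht⟩
    rw [List.mem_map] at ht
    obtain ⟨j, hj, rfl⟩ := ht
    rw [PySem.List.mem_pyRange_one] at hi hj
    obtain ⟨hi0, _⟩ := hi
    obtain ⟨hij, _⟩ := hj
    have hj0 : 0 ≤ j := le_trans hi0 hij
    simp only [PySem.Str.toList_slice, PySem.Chars.slice_eq_listSlice]
    rw [PySem.List.slice_toNat _ hi0 hj0]
    exact ⟨s.toList.take i.toNat, (s.toList.drop i.toNat).drop (j.toNat - i.toNat), by
      rw [List.append_assoc, List.take_append_drop, List.take_append_drop]⟩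
  · rintro ⟨pre, suf, hs⟩
    have hl : s.toList.length = pre.length + t.toList.length + suf.length := by
      rw [← hs]; simp; omega
    refine ⟨(pre.length : Int), ?_, List.mem_map.mpr
      ⟨(pre.length : Int) + (t.toList.length : Int), ?_, ?_⟩⟩
    · rw [PySem.List.mem_pyRange_one, hlen]; omega
    · rw [PySem.List.mem_pyRange_one, hlen]; omega
    · apply String.toList_inj.mp
      simp only [PySem.Str.toList_slice, PySem.Chars.slice_eq_listSlice]
      rw [PySem.List.slice_natCast_add, ← hs, List.append_assoc, List.drop_left,
        List.take_left]

-- B's fold: first component collects the lowered names, second all their substrings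
theorem fold_pair_spec (l : List (String × String)) (p : PySem.Set String × PySem.Set String)
    (x : String) :
    (x ∈ (l.foldl
        (fun (p : PySem.Set String × PySem.Set String) kv =>
          let name := PySem.Str.lower kv.1
          (PySem.Set.add p.1 name, PySem.Set.union p.2 (pvSubstrings name)))
        p).1 ↔ x ∈ p.1 ∨ ∃ kv ∈ l, x = PySem.Str.lower kv.1) ∧
    (x ∈ (l.foldl
        (fun (p : PySem.Set String × PySem.Set String) kv =>
          let name := PySem.Str.lower kv.1
          (PySem.Set.add p.1 name, PySem.Set.union p.2 (pvSubstrings name)))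
        p).2 ↔ x ∈ p.2 ∨ ∃ kv ∈ l, x ∈ pvSubstrings (PySem.Str.lower kv.1)) := by
  induction l generalizing p with
  | nil => simp
  | cons kv l ih =>
    simp only [List.foldl_cons]
    obtain ⟨ih1, ih2⟩ := ih
      ((PySem.Set.add p.1 (PySem.Str.lower kv.1),
        PySem.Set.union p.2 (pvSubstrings (PySem.Str.lower kv.1))))
    constructor
    · rw [ih1]
      simp only [PySem.Set.mem_add, List.mem_cons]
      constructor
      · rintro ((h | h) | ⟨y, hy, h⟩)
        · exact Or.inl h
        · exact Or.inr ⟨kv, Or.inl rfl, h⟩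
        · exact Or.inr ⟨y, Or.inr hy, h⟩
      · rintro (h | ⟨y, (rfl | hy), h⟩)
        · exact Or.inl (Or.inl h)
        · exact Or.inl (Or.inr h)
        · exact Or.inr ⟨y, hy, h⟩
    · rw [ih2]
      simp only [PySem.Set.mem_union, List.mem_cons]
      constructor
      · rintro ((h | h) | ⟨y, hy, h⟩)
        · exact Or.inl h
        · exact Or.inr ⟨kv, Or.inl rfl, h⟩
        · exact Or.inr ⟨y, Or.inr hy, h⟩
      · rintro (h | ⟨y, (rfl | hy), h⟩)
        · exact Or.inl (Or.inl h)
        · exact Or.inl (Or.inr h)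
        · exact Or.inr ⟨y, hy, h⟩

-- ===== VERDICT (by name: the statement is the Claim_ definition above) =====
theorem identify_missing_channels_py_spec : Claim_equal_identify_missing_channels_py := by
  intro ldx ld _
  unfold Spec_identify_missing_channels_py identify_missing_channels_py
    identify_missing_channels_py_alt
  simp only []
  rw [foldl_if_append]
  simp only [List.nil_append]
  apply List.filter_congr
  intro r hr
  -- P: some lowered key matches r by the symmetric substring test
  have hA : ((PySem.Set.ofList ((ldx.map Prod.fst).map PySem.Str.lower)).any
        (fun ldx_ch => PySem.Str.isIn r ldx_ch || PySem.Str.isIn ldx_ch r)) = true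
      ↔ ∃ kv ∈ ldx, (r.toList <:+: (PySem.Str.lower kv.1).toList ∨
          (PySem.Str.lower kv.1).toList <:+: r.toList) := by
    rw [List.any_eq_true]
    constructor
    · rintro ⟨y, hy, hp⟩
      rw [PySem.Set.mem_ofList, List.mem_map] at hy
      obtain ⟨n, hn, rfl⟩ := hy
      rw [List.mem_map] at hn
      obtain ⟨kv, hkv, rfl⟩ := hn
      rw [Bool.or_eq_true, PySem.Str.isIn_iff_infix, PySem.Str.isIn_iff_infix] at hp
      exact ⟨kv, hkv, hp⟩
    · rintro ⟨kv, hkv, hp⟩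
      refine ⟨PySem.Str.lower kv.1, ?_, ?_⟩
      · rw [PySem.Set.mem_ofList, List.mem_map]
        exact ⟨kv.1, List.mem_map.mpr ⟨kv, hkv, rfl⟩, rfl⟩
      · rw [Bool.or_eq_true, PySem.Str.isIn_iff_infix, PySem.Str.isIn_iff_infix]
        exact hp
  have h1 := fun x => (fold_pair_spec ldx (PySem.Set.empty, PySem.Set.empty) x).1
  have h2 := fun x => (fold_pair_spec ldx (PySem.Set.empty, PySem.Set.empty) x).2
  have hC : PySem.Set.contains
        ((ldx.foldl
          (fun (p : PySem.Set String × PySem.Set String) kv =>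
            let name := PySem.Str.lower kv.1
            (PySem.Set.add p.1 name, PySem.Set.union p.2 (pvSubstrings name)))
          (PySem.Set.empty, PySem.Set.empty)).2) r = true
      ↔ ∃ kv ∈ ldx, r.toList <:+: (PySem.Str.lower kv.1).toList := by
    rw [PySem.Set.contains_iff, h2]
    simp only [PySem.Set.empty, List.not_mem_nil, false_or, mem_pvSubstrings]
  have hI : (PySem.Set.len (PySem.Set.inter (pvSubstrings r)
        ((ldx.foldl
          (fun (p : PySem.Set String × PySem.Set String) kv =>
            let name := PySem.Str.lower kv.1
            (PySem.Set.add p.1 name, PySem.Set.union p.2 (pvSubstrings name)))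
          (PySem.Set.empty, PySem.Set.empty)).1)) = 0)
      ↔ ¬ ∃ kv ∈ ldx, (PySem.Str.lower kv.1).toList <:+: r.toList := by
    rw [show ∀ s : PySem.Set String, PySem.Set.len s = (s.length : Int) from fun _ => rfl,
      Nat.cast_eq_zero, List.length_eq_zero_iff, List.eq_nil_iff_forall_not_mem]
    constructor
    · rintro h ⟨kv, hkv, hinf⟩
      exact h (PySem.Str.lower kv.1) (by
        rw [PySem.Set.mem_inter, mem_pvSubstrings, h1]
        exact ⟨hinf, Or.inr ⟨kv, hkv, rfl⟩⟩)
    · rintro h x hx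
      rw [PySem.Set.mem_inter, mem_pvSubstrings, h1] at hx
      obtain ⟨hinf, (habs | ⟨kv, hkv, rfl⟩)⟩ := hx
      · simp [PySem.Set.empty] at habs
      · exact h ⟨kv, hkv, hinf⟩
  rw [Bool.eq_iff_iff, Bool.not_eq_true', Bool.eq_false_iff, Ne, hA,
    Bool.and_eq_true, Bool.not_eq_true', Bool.eq_false_iff, Ne, hC, beq_iff_eq, hI]
  push Not
  constructor
  · intro h
    exact ⟨fun kv hkv => (h kv hkv).1, fun kv hkv => (h kv hkv).2⟩
  · rintro ⟨ha, hb⟩ kv hkv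
    exact ⟨ha kv hkv, hb kv hkv⟩
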